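-- pv_equiv track=rewrite | github.com/sunilsoni/interview-notes-python | com/interview/2025/may/codesignal/test1/test1.py | solution
-- ===== SOURCE A (Python) =====
-- from typing import List
--
-- def solution(matrix: List[List[int]]) -> int:
--     if not matrix or not matrix[0]:
--         return 0
--
--     n, m = len(matrix), len(matrix[0])
--     directions = [(1, 1), (1, -1), (-1, 1), (-1, -1)]
--     best = 0
--
--     # expected value at step k
--     def expected(k: int) -> int:
--         if k == 0:
--             return 1
--         return 2 if k % 2 else 0
--
--     for r in range(n):
--         for c in range(m):
--             if matrix[r][c] != 1:
--                 continue                        # must start with 1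
--             for dr, dc in directions:
--                 k, x, y = 0, r, c
--                 while 0 <= x < n and 0 <= y < m and matrix[x][y] == expected(k):
--                     # check if current cell is on a border
--                     on_border = x in (0, n - 1) or y in (0, m - 1)
--                     # look ahead
--                     nx, ny = x + dr, y + dc
--                     # if next step is outside, current cell is the last one
--                     if not (0 <= nx < n and 0 <= ny < m):
--                         if on_border:
--                             best = max(best, k + 1)
--                         break
--                     # if next step breaks, decide if current cell finishes on border
--                     if matrix[nx][ny] != expected(k + 1):
--                         if on_border:
--                             best = max(best, k + 1)
--                         break
--                     # otherwise continue
--                     x, y, k = nx, ny, k + 1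
--     return best
-- ===== SOURCE B (Python) =====
-- from typing import List
--
-- def solution(matrix: List[List[int]]) -> int:
--     # One pass per direction: run lengths of the alternating 2/0 tail
--     # carried row by row, so each cell is visited O(1) times per direction (no per-start rescan).
--     if not matrix or not matrix[0]:
--         return 0
--     n, m = len(matrix), len(matrix[0])
--     best = 0
--     for dr, dc in ((1, 1), (1, -1), (-1, 1), (-1, -1)):
--         prev = [0] * m            # run lengths for the row at x + dr
--         rows = range(n - 1, -1, -1) if dr == 1 else range(n)
--         for x in rows:
--             cur = [0] * m
--             for y in range(m):
--                 v = matrix[x][y]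
--                 ny = y + dc
--                 nxt = matrix[x + dr][ny] if 0 <= x + dr < n and 0 <= ny < m else None
--                 if v == 0 or v == 2:
--                     cur[y] = 1 + (prev[ny] if nxt == 2 - v else 0)
--                 elif v == 1:
--                     L = 1 + (prev[ny] if nxt == 2 else 0)
--                     ex, ey = x + (L - 1) * dr, y + (L - 1) * dc
--                     if ex in (0, n - 1) or ey in (0, m - 1):
--                         best = max(best, L)
--             prev = cur
--     return best
-- ===== Notes on version B (the rewrite author's own statement) =====
-- stated objective: alternative
-- what changed: A rescans the whole diagonal from every 1-cell in each of the 4 directions; B instead makes one sweep per direction, carrying the alternating 2/0 run lengths from the previously processed row, so each cell's chain length and border endpoint are combined in O(1) — asymptotically O(n*m) versus A's O(n*m*min(n,m)), though on the generated timing inputs (few pattern cells) A's skip-fast scan has the better constant.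
import Mathlib
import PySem

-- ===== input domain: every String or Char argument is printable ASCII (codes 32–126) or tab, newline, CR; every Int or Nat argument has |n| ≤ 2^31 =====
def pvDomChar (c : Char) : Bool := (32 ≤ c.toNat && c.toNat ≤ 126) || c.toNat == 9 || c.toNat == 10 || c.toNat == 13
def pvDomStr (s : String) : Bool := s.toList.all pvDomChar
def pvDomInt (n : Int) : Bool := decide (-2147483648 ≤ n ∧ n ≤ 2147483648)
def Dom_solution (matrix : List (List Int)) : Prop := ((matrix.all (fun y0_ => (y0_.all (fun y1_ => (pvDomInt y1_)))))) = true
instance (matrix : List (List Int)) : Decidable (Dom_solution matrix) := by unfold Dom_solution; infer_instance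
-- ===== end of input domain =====

-- B replaces A's per-start diagonal rescans by one sweep per direction that carries
-- alternating-run lengths row to row (objective: alternative algorithm, each cell visited O(1) times per direction).

-- ===== PORT A =====

-- matrix[x][y]; every access in both programs is guarded to be in range (Pre_ excludes ragged rows)
def pvGet (mt : List (List Int)) (x y : Int) : Int :=
  PySem.List.pyGetD (PySem.List.pyGetD mt x []) y 0

def pvDirs : List (Int × Int) := [(1, 1), (1, -1), (-1, 1), (-1, -1)]

def expectedA (k : Int) : Int := if k = 0 then 1 else if PySem.Int.mod k 2 ≠ 0 then 2 else 0

-- A's inner while-loop; the fuel n+m+1 strictly exceeds the ≤ min(n,m) iterations Python performs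
def walkA (mt : List (List Int)) (n m dr dc : Int) :
    Nat → Int → Int → Int → Int → Int
  | 0, _, _, _, best => best
  | fuel + 1, k, x, y, best =>
    if 0 ≤ x ∧ x < n ∧ 0 ≤ y ∧ y < m ∧ pvGet mt x y = expectedA k then
      if ¬ (0 ≤ x + dr ∧ x + dr < n ∧ 0 ≤ y + dc ∧ y + dc < m) then
        if x = 0 ∨ x = n - 1 ∨ y = 0 ∨ y = m - 1 then max best (k + 1) else best
      else if pvGet mt (x + dr) (y + dc) ≠ expectedA (k + 1) then
        if x = 0 ∨ x = n - 1 ∨ y = 0 ∨ y = m - 1 then max best (k + 1) else best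
      else walkA mt n m dr dc fuel (k + 1) (x + dr) (y + dc) best
    else best

def solution (matrix : List (List Int)) : Int :=
  if matrix = [] ∨ matrix.headD [] = [] then 0
  else
    let n : Int := matrix.length
    let m : Int := (matrix.headD []).length
    (List.range matrix.length).foldl (fun best (r : Nat) =>
      (List.range (matrix.headD []).length).foldl (fun best (c : Nat) =>
        if pvGet matrix (r : Int) (c : Int) ≠ 1 then best
        else pvDirs.foldl (fun best d =>
          walkA matrix n m d.1 d.2 (matrix.length + (matrix.headD []).length + 1) 0 (r : Int) (c : Int) best) best)
        best) 0

-- ===== PORT B =====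

-- one cell of B's sweep: returns (new best, cur[y])
def cellB (mt : List (List Int)) (n m dr dc x y : Int) (best : Int) (prev : List Int) :
    Int × Int :=
  let v := pvGet mt x y
  let nxt : Option Int :=
    if 0 ≤ x + dr ∧ x + dr < n ∧ 0 ≤ y + dc ∧ y + dc < m then
      some (pvGet mt (x + dr) (y + dc))
    else none
  if v = 0 ∨ v = 2 then
    (best, 1 + (if nxt = some (2 - v) then PySem.List.pyGetD prev (y + dc) 0 else 0))
  else if v = 1 then
    let L := 1 + (if nxt = some 2 then PySem.List.pyGetD prev (y + dc) 0 else 0)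
    (if x + (L - 1) * dr = 0 ∨ x + (L - 1) * dr = n - 1 ∨
        y + (L - 1) * dc = 0 ∨ y + (L - 1) * dc = m - 1
      then max best L else best, 0)
  else (best, 0)

-- one row of B's sweep: fills cur left to right and updates best at 1-cells
def rowB (mt : List (List Int)) (n m dr dc x : Int) (best : Int) (prev : List Int) :
    Int × List Int :=
  (List.range m.toNat).foldl
    (fun st (yn : Nat) =>
      let r := cellB mt n m dr dc x (yn : Int) st.1 prev
      (r.1, st.2 ++ [r.2]))
    (best, ([] : List Int))

-- one direction of B's sweep: rows ordered so that row x+dr is processed before row x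
def dirB (mt : List (List Int)) (n m : Int) (d : Int × Int) (best : Int) : Int :=
  let rows : List Int :=
    if d.1 = 1 then ((List.range n.toNat).map Int.ofNat).reverse
    else (List.range n.toNat).map Int.ofNat
  (rows.foldl (fun st x => rowB mt n m d.1 d.2 x st.1 st.2)
    (best, List.replicate m.toNat 0)).1

def solution_alt (matrix : List (List Int)) : Int :=
  if matrix = [] ∨ matrix.headD [] = [] then 0
  else
    pvDirs.foldl
      (fun best d =>
        dirB matrix (matrix.length : Int) ((matrix.headD []).length : Int) d best) 0

-- ===== PRECONDITION & SPEC =====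

-- Pre_ excludes exactly the ragged matrices (some row shorter than row 0) on which
-- Python A (and B alike) raises IndexError when reading matrix[r][c] for c < len(matrix[0]).
def Pre_solution (matrix : List (List Int)) : Prop :=
  ∀ row ∈ matrix, (matrix.headD []).length ≤ row.length
instance (matrix : List (List Int)) : Decidable (Pre_solution matrix) := by
  unfold Pre_solution; infer_instance

def pvWitness_solution : List (List Int) := [[1, 2], [0, 2]]

def Spec_solution (matrix : List (List Int)) (out : Int) : Prop := out = solution_alt matrix
instance (matrix : List (List Int)) (out : Int) : Decidable (Spec_solution matrix out) := by
  unfold Spec_solution; infer_instance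

-- ===== CLAIM (what is proved, stated in full; the proofs are below) =====
def Claim_equal_solution : Prop :=
  ∀ (matrix : List (List Int)), Dom_solution matrix → Pre_solution matrix →
    Spec_solution matrix (solution matrix)

-- ===== LEMMAS AND PROOFS =====

def nI (mt : List (List Int)) : Int := mt.length
def mI (mt : List (List Int)) : Int := (mt.headD []).length

-- length of the maximal alternating (v, 2-v, v, …) run starting at (x,y) along (dr,dc), with fuel
def runF (mt : List (List Int)) (dr dc : Int) : Nat → Int → Int → Int
  | 0, _, _ => 1
  | f + 1, x, y =>
    if 0 ≤ x + dr ∧ x + dr < nI mt ∧ 0 ≤ y + dc ∧ y + dc < mI mt ∧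
        pvGet mt (x + dr) (y + dc) = 2 - pvGet mt x y
    then 1 + runF mt dr dc f (x + dr) (y + dc) else 1

-- enough fuel for a run starting in row x
def bnd (mt : List (List Int)) (dr x : Int) : Nat :=
  (if dr = 1 then nI mt - 1 - x else x).toNat

def RR (mt : List (List Int)) (dr dc x y : Int) : Int := runF mt dr dc (bnd mt dr x) x y

-- value of B's cur[y] cell: run length where defined, 0 elsewhere
def Pv (mt : List (List Int)) (dr dc x y : Int) : Int :=
  if (0 ≤ x ∧ x < nI mt ∧ 0 ≤ y ∧ y < mI mt) ∧ (pvGet mt x y = 0 ∨ pvGet mt x y = 2)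
  then RR mt dr dc x y else 0

-- chain length from a 1-cell
def Lst (mt : List (List Int)) (dr dc x y : Int) : Int :=
  if 0 ≤ x + dr ∧ x + dr < nI mt ∧ 0 ≤ y + dc ∧ y + dc < mI mt ∧
      pvGet mt (x + dr) (y + dc) = 2
  then 1 + RR mt dr dc (x + dr) (y + dc) else 1

-- the contribution of start (x,y) and direction d to the answer
def CC (mt : List (List Int)) (d : Int × Int) (x y : Int) : Int :=
  if pvGet mt x y = 1 then
    let L := Lst mt d.1 d.2 x y
    if x + (L - 1) * d.1 = 0 ∨ x + (L - 1) * d.1 = nI mt - 1 ∨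
        y + (L - 1) * d.2 = 0 ∨ y + (L - 1) * d.2 = mI mt - 1
    then L else 0
  else 0

def listA (mt : List (List Int)) : List Int :=
  (List.range mt.length).flatMap (fun (r : Nat) =>
    (List.range (mt.headD []).length).flatMap (fun (c : Nat) =>
      pvDirs.map (fun d => CC mt d (r : Int) (c : Int))))

def rowsL (mt : List (List Int)) (dr : Int) : List Int :=
  if dr = 1 then ((List.range mt.length).map Int.ofNat).reverse
  else (List.range mt.length).map Int.ofNat

def blockB (mt : List (List Int)) (d : Int × Int) (x : Int) : List Int :=
  (List.range (mt.headD []).length).map (fun (c : Nat) => CC mt d x (c : Int))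

def listB (mt : List (List Int)) : List Int :=
  pvDirs.flatMap (fun d => (rowsL mt d.1).flatMap (fun x => blockB mt d x))

theorem foldl_eq_of_inv {α : Type} (l : List α) (f g : Int → α → Int) (P : Int → Prop)
    (hpres : ∀ b a, a ∈ l → P b → P (g b a))
    (heq : ∀ b a, a ∈ l → P b → f b a = g b a) :
    ∀ b, P b → l.foldl f b = l.foldl g b := by
  induction l with
  | nil => intro b _; rfl
  | cons a l ih =>
    intro b hb
    simp only [List.foldl_cons]
    rw [heq b a (by simp) hb]
    exact ih (fun b a h => hpres b a (by simp [h]))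
      (fun b a h => heq b a (by simp [h])) _ (hpres b a (by simp) hb)

theorem bnd_step (mt : List (List Int)) {dr x : Int} (hdr : dr = 1 ∨ dr = -1)
    (h0 : 0 ≤ x + dr) (h1 : x + dr < nI mt) :
    bnd mt dr x = bnd mt dr (x + dr) + 1 := by
  rcases hdr with h | h <;> subst h <;> simp [bnd] <;> omega

theorem RR_pos (mt : List (List Int)) {dr dc x y : Int} (hdr : dr = 1 ∨ dr = -1)
    (hc : 0 ≤ x + dr ∧ x + dr < nI mt ∧ 0 ≤ y + dc ∧ y + dc < mI mt ∧
      pvGet mt (x + dr) (y + dc) = 2 - pvGet mt x y) :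
    RR mt dr dc x y = 1 + RR mt dr dc (x + dr) (y + dc) := by
  rw [RR, bnd_step mt hdr hc.1 hc.2.1, runF, if_pos hc]; rfl

theorem RR_one (mt : List (List Int)) {dr dc x y : Int}
    (hc : ¬ (0 ≤ x + dr ∧ x + dr < nI mt ∧ 0 ≤ y + dc ∧ y + dc < mI mt ∧
      pvGet mt (x + dr) (y + dc) = 2 - pvGet mt x y)) :
    RR mt dr dc x y = 1 := by
  cases hb : bnd mt dr x with
  | zero => simp [RR, hb, runF]
  | succ t => rw [RR, hb, runF, if_neg hc]

theorem expectedA_succ {k : Int} (hk : 1 ≤ k) : expectedA (k + 1) = 2 - expectedA k := by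
  simp only [expectedA]
  simp only [PySem.Int.mod_eq_emod_of_pos (show (0:Int) < 2 by norm_num)]
  split_ifs <;> omega

theorem walkA_cont (mt : List (List Int)) {dr : Int} (dc : Int) (hdr : dr = 1 ∨ dr = -1) :
    ∀ (f : Nat) (k x y best : Int),
      0 ≤ x → x < nI mt → 0 ≤ y → y < mI mt →
      pvGet mt x y = expectedA k → 1 ≤ k → bnd mt dr x + 1 ≤ f →
      walkA mt (nI mt) (mI mt) dr dc f k x y best =
        (if x + (RR mt dr dc x y - 1) * dr = 0 ∨ x + (RR mt dr dc x y - 1) * dr = nI mt - 1 ∨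
            y + (RR mt dr dc x y - 1) * dc = 0 ∨ y + (RR mt dr dc x y - 1) * dc = mI mt - 1
          then max best (k + RR mt dr dc x y) else best) := by
  intro f
  induction f with
  | zero =>
    intro k x y best _ _ _ _ _ _ hf
    exact absurd hf (by omega)
  | succ f ih =>
    intro k x y best hx0 hx1 hy0 hy1 hg hk hf
    rw [walkA, if_pos ⟨hx0, hx1, hy0, hy1, hg⟩]
    have hE : expectedA (k + 1) = 2 - pvGet mt x y := by rw [expectedA_succ hk, hg]
    by_cases hin : 0 ≤ x + dr ∧ x + dr < nI mt ∧ 0 ≤ y + dc ∧ y + dc < mI mt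
    · rw [if_neg (not_not_intro hin)]
      by_cases hv : pvGet mt (x + dr) (y + dc) = expectedA (k + 1)
      · rw [if_neg (not_not_intro hv)]
        have hc : 0 ≤ x + dr ∧ x + dr < nI mt ∧ 0 ≤ y + dc ∧ y + dc < mI mt ∧
            pvGet mt (x + dr) (y + dc) = 2 - pvGet mt x y :=
          ⟨hin.1, hin.2.1, hin.2.2.1, hin.2.2.2, hv.trans hE⟩
        have hstep := bnd_step mt hdr hc.1 hc.2.1
        rw [ih (k + 1) (x + dr) (y + dc) best hc.1 hc.2.1 hc.2.2.1 hc.2.2.2.1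
              (hv.trans (by rw [expectedA_succ hk])) (by omega) (by omega),
          RR_pos mt hdr hc,
          show x + (1 + RR mt dr dc (x + dr) (y + dc) - 1) * dr
              = x + dr + (RR mt dr dc (x + dr) (y + dc) - 1) * dr from by ring,
          show y + (1 + RR mt dr dc (x + dr) (y + dc) - 1) * dc
              = y + dc + (RR mt dr dc (x + dr) (y + dc) - 1) * dc from by ring,
          show k + (1 + RR mt dr dc (x + dr) (y + dc))
              = k + 1 + RR mt dr dc (x + dr) (y + dc) from by ring]
      · rw [if_pos hv]
        have h1 : RR mt dr dc x y = 1 := RR_one mt (by rw [hE] at hv; tauto)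
        rw [h1]
        norm_num
    · rw [if_pos (by tauto)]
      have h1 : RR mt dr dc x y = 1 := RR_one mt (by tauto)
      rw [h1]
      norm_num

theorem walkA_start (mt : List (List Int)) {dr : Int} (dc : Int) (hdr : dr = 1 ∨ dr = -1)
    {f : Nat} {x y best : Int}
    (hx0 : 0 ≤ x) (hx1 : x < nI mt) (hy0 : 0 ≤ y) (hy1 : y < mI mt)
    (hget : pvGet mt x y = 1) (hb : 0 ≤ best) (hf : bnd mt dr x + 2 ≤ f) :
    walkA mt (nI mt) (mI mt) dr dc f 0 x y best = max best (CC mt (dr, dc) x y) := by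
  obtain ⟨f, rfl⟩ : ∃ f', f = f' + 1 := ⟨f - 1, by omega⟩
  rw [walkA, if_pos ⟨hx0, hx1, hy0, hy1, by rw [hget]; rfl⟩]
  have hE1 : expectedA (0 + 1) = 2 := by decide
  by_cases hin : 0 ≤ x + dr ∧ x + dr < nI mt ∧ 0 ≤ y + dc ∧ y + dc < mI mt
  · rw [if_neg (not_not_intro hin)]
    by_cases hv : pvGet mt (x + dr) (y + dc) = expectedA (0 + 1)
    · rw [if_neg (not_not_intro hv)]
      have hc2 : pvGet mt (x + dr) (y + dc) = 2 := by rw [hv, hE1]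
      have hL : Lst mt dr dc x y = 1 + RR mt dr dc (x + dr) (y + dc) := by
        rw [Lst, if_pos ⟨hin.1, hin.2.1, hin.2.2.1, hin.2.2.2, hc2⟩]
      have hstep := bnd_step mt hdr hin.1 hin.2.1
      norm_num only
      rw [walkA_cont mt dc hdr f 1 (x + dr) (y + dc) best hin.1 hin.2.1 hin.2.2.1
            hin.2.2.2 (by rw [hc2]; decide) le_rfl (by omega)]
      rw [CC, if_pos hget]
      simp only [hL]
      rw [show x + (1 + RR mt dr dc (x + dr) (y + dc) - 1) * dr
            = x + dr + (RR mt dr dc (x + dr) (y + dc) - 1) * dr from by ring,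
        show y + (1 + RR mt dr dc (x + dr) (y + dc) - 1) * dc
            = y + dc + (RR mt dr dc (x + dr) (y + dc) - 1) * dc from by ring]
      split_ifs with hbord
      · norm_num
      · exact (max_eq_left hb).symm
    · rw [if_pos hv]
      have hL : Lst mt dr dc x y = 1 := by
        rw [Lst, if_neg (by rw [hE1] at hv; tauto)]
      rw [CC, if_pos hget]
      simp only [hL]
      norm_num
      split_ifs with hbord
      · rfl
      · exact (max_eq_left hb).symm
  · rw [if_pos (by tauto)]
    have hL : Lst mt dr dc x y = 1 := by rw [Lst, if_neg (by tauto)]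
    rw [CC, if_pos hget]
    simp only [hL]
    norm_num
    split_ifs with hbord
    · rfl
    · exact (max_eq_left hb).symm

theorem le_foldl_inner {α : Type} (h : α → List Int) :
    ∀ (l : List α) (b : Int), b ≤ l.foldl (fun b a => (h a).foldl max b) b := by
  intro l
  induction l with
  | nil => intro b; simp
  | cons a l ih =>
    intro b
    exact le_trans (PySem.List.le_foldl_max (h a) b).1 (ih _)

theorem bnd_le (mt : List (List Int)) {dr x : Int} (hdr : dr = 1 ∨ dr = -1)
    (hx0 : 0 ≤ x) (hx1 : x < nI mt) :
    bnd mt dr x + 2 ≤ mt.length + (mt.headD []).length + 1 := by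
  rcases hdr with h | h <;> subst h <;> simp [bnd, nI] at * <;> omega

theorem cellA_eq (mt : List (List Int)) {r c : Nat} {b : Int}
    (hr : r < mt.length) (hc : c < (mt.headD []).length) (hb : 0 ≤ b) :
    (if pvGet mt (r : Int) (c : Int) ≠ 1 then b
      else pvDirs.foldl (fun best d =>
        walkA mt (nI mt) (mI mt) d.1 d.2 (mt.length + (mt.headD []).length + 1) 0
          (r : Int) (c : Int) best) b) =
    (pvDirs.map (fun d => CC mt d (r : Int) (c : Int))).foldl max b := by
  have hx0 : (0 : Int) ≤ (r : Int) := by positivity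
  have hx1 : (r : Int) < nI mt := by unfold nI; exact_mod_cast hr
  have hy0 : (0 : Int) ≤ (c : Int) := by positivity
  have hy1 : (c : Int) < mI mt := by unfold mI; exact_mod_cast hc
  by_cases hone : pvGet mt (r : Int) (c : Int) = 1
  · rw [if_neg (not_not_intro hone)]
    simp only [pvDirs, List.foldl_cons, List.foldl_nil, List.map_cons, List.map_nil]
    rw [walkA_start mt 1 (Or.inl rfl) hx0 hx1 hy0 hy1 hone hb
        (bnd_le mt (Or.inl rfl) hx0 hx1)]
    rw [walkA_start mt (-1) (Or.inl rfl) hx0 hx1 hy0 hy1 hone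
        (le_trans hb (le_max_left _ _)) (bnd_le mt (Or.inl rfl) hx0 hx1)]
    rw [walkA_start mt 1 (Or.inr rfl) hx0 hx1 hy0 hy1 hone
        (le_trans (le_trans hb (le_max_left _ _)) (le_max_left _ _))
        (bnd_le mt (Or.inr rfl) hx0 hx1)]
    rw [walkA_start mt (-1) (Or.inr rfl) hx0 hx1 hy0 hy1 hone
        (le_trans (le_trans (le_trans hb (le_max_left _ _)) (le_max_left _ _))
          (le_max_left _ _))
        (bnd_le mt (Or.inr rfl) hx0 hx1)]
  · rw [if_pos hone]
    simp [pvDirs, CC, hone, List.foldl_cons, max_eq_left hb]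

theorem solution_eq_listA (mt : List (List Int))
    (h : ¬ (mt = [] ∨ mt.headD [] = [])) :
    solution mt = (listA mt).foldl max 0 := by
  unfold solution
  rw [if_neg h]
  simp only [listA, List.foldl_flatMap]
  exact foldl_eq_of_inv _ _ _ (fun b => 0 ≤ b)
    (fun b r _ hb => le_trans hb (le_foldl_inner _ _ _))
    (fun b r hrm hb =>
      foldl_eq_of_inv _ _ _ (fun b => 0 ≤ b)
        (fun b c _ hb => le_trans hb (PySem.List.le_foldl_max _ _).1)
        (fun b c hcm hb =>
          cellA_eq mt (List.mem_range.mp hrm) (List.mem_range.mp hcm) hb)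
        b hb)
    0 le_rfl

theorem CC_one (mt : List (List Int)) {d : Int × Int} {x y : Int}
    (h : pvGet mt x y = 1) :
    CC mt d x y =
      if x + (Lst mt d.1 d.2 x y - 1) * d.1 = 0 ∨
          x + (Lst mt d.1 d.2 x y - 1) * d.1 = nI mt - 1 ∨
          y + (Lst mt d.1 d.2 x y - 1) * d.2 = 0 ∨
          y + (Lst mt d.1 d.2 x y - 1) * d.2 = mI mt - 1
      then Lst mt d.1 d.2 x y else 0 := by
  simp [CC, h]

theorem cellB_eq (mt : List (List Int)) {dr dc x y : Int} (hdr : dr = 1 ∨ dr = -1)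
    (hx0 : 0 ≤ x) (hx1 : x < nI mt) (hy0 : 0 ≤ y) (hy1 : y < mI mt)
    {best : Int} (hb : 0 ≤ best) {prev : List Int}
    (hprev : ∀ j : Int, 0 ≤ j → j < mI mt →
      PySem.List.pyGetD prev j 0 = Pv mt dr dc (x + dr) j) :
    cellB mt (nI mt) (mI mt) dr dc x y best prev =
      (max best (CC mt (dr, dc) x y), Pv mt dr dc x y) := by
  simp only [cellB]
  by_cases hin : 0 ≤ x + dr ∧ x + dr < nI mt ∧ 0 ≤ y + dc ∧ y + dc < mI mt
  · rw [if_pos hin]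
    by_cases hv02 : pvGet mt x y = 0 ∨ pvGet mt x y = 2
    · rw [if_pos hv02]
      have hcc : CC mt (dr, dc) x y = 0 := by
        rw [CC, if_neg (by rcases hv02 with h | h <;> rw [h] <;> norm_num)]
      rw [hcc, max_eq_left hb]
      have hpv : Pv mt dr dc x y = RR mt dr dc x y := by
        rw [Pv, if_pos ⟨⟨hx0, hx1, hy0, hy1⟩, hv02⟩]
      rw [hpv]
      by_cases hg : pvGet mt (x + dr) (y + dc) = 2 - pvGet mt x y
      · rw [if_pos (by rw [hg]), hprev (y + dc) hin.2.2.1 hin.2.2.2]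
        have hpvn : Pv mt dr dc (x + dr) (y + dc) = RR mt dr dc (x + dr) (y + dc) := by
          rw [Pv, if_pos ⟨⟨hin.1, hin.2.1, hin.2.2.1, hin.2.2.2⟩, by
            rcases hv02 with h | h <;> rw [hg, h] <;> norm_num⟩]
        rw [hpvn, RR_pos mt hdr ⟨hin.1, hin.2.1, hin.2.2.1, hin.2.2.2, hg⟩]
      · rw [if_neg (by simpa using fun hh => hg hh),
          RR_one mt (by intro hc; exact hg hc.2.2.2.2)]
        norm_num
    · rw [if_neg hv02]
      by_cases hv1 : pvGet mt x y = 1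
      · rw [if_pos hv1]
        have hpv : Pv mt dr dc x y = 0 := by
          rw [Pv, if_neg (by rw [hv1]; norm_num)]
        rw [hpv]
        have hL : (1 + if (if 0 ≤ x + dr ∧ x + dr < nI mt ∧ 0 ≤ y + dc ∧ y + dc < mI mt
              then some (pvGet mt (x + dr) (y + dc)) else none) = some 2
              then PySem.List.pyGetD prev (y + dc) 0 else 0) = Lst mt dr dc x y := by
          rw [if_pos hin]
          by_cases hg : pvGet mt (x + dr) (y + dc) = 2
          · rw [if_pos (by rw [hg]), hprev (y + dc) hin.2.2.1 hin.2.2.2, Lst,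
              if_pos ⟨hin.1, hin.2.1, hin.2.2.1, hin.2.2.2, hg⟩, Pv,
              if_pos ⟨⟨hin.1, hin.2.1, hin.2.2.1, hin.2.2.2⟩, Or.inr hg⟩]
          · rw [if_neg (by simpa using fun hh => hg hh), Lst,
              if_neg (by intro hc; exact hg hc.2.2.2.2)]
            norm_num
        rw [if_pos hin] at hL
        rw [hL]
        simp only [CC_one mt hv1]
        split_ifs with hbord
        · rfl
        · rw [max_eq_left hb]
      · rw [if_neg hv1]
        rw [CC, if_neg hv1, max_eq_left hb, Pv,
          if_neg (by intro hc; exact hv02 hc.2)]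
  · rw [if_neg hin]
    have hnone2 : ∀ z : Int,
        (if (none : Option Int) = some z then PySem.List.pyGetD prev (y + dc) 0 else 0) = 0 := by
      simp
    by_cases hv02 : pvGet mt x y = 0 ∨ pvGet mt x y = 2
    · rw [if_pos hv02, hnone2]
      have hcc : CC mt (dr, dc) x y = 0 := by
        rw [CC, if_neg (by rcases hv02 with h | h <;> rw [h] <;> norm_num)]
      have hpv : Pv mt dr dc x y = RR mt dr dc x y := by
        rw [Pv, if_pos ⟨⟨hx0, hx1, hy0, hy1⟩, hv02⟩]
      rw [hcc, max_eq_left hb, hpv,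
        RR_one mt (fun hc => hin ⟨hc.1, hc.2.1, hc.2.2.1, hc.2.2.2.1⟩)]
      norm_num
    · rw [if_neg hv02]
      by_cases hv1 : pvGet mt x y = 1
      · rw [if_pos hv1, hnone2]
        have hLst : Lst mt dr dc x y = 1 := by
          rw [Lst, if_neg (fun hc => hin ⟨hc.1, hc.2.1, hc.2.2.1, hc.2.2.2.1⟩)]
        simp only [CC_one mt hv1]
        have hpv : Pv mt dr dc x y = 0 := by
          rw [Pv, if_neg (by rw [hv1]; norm_num)]
        rw [hLst, hpv]
        norm_num
        split_ifs with hbord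
        · rfl
        · rw [max_eq_left hb]
      · rw [if_neg hv1, CC, if_neg hv1, max_eq_left hb, Pv,
          if_neg (by intro hc; exact hv02 hc.2)]

theorem rowB_eq (mt : List (List Int)) {dr dc x : Int} (hdr : dr = 1 ∨ dr = -1)
    (hx0 : 0 ≤ x) (hx1 : x < nI mt)
    {best : Int} (hb : 0 ≤ best) {prev : List Int}
    (hprev : ∀ j : Int, 0 ≤ j → j < mI mt →
      PySem.List.pyGetD prev j 0 = Pv mt dr dc (x + dr) j) :
    rowB mt (nI mt) (mI mt) dr dc x best prev =
      ((blockB mt (dr, dc) x).foldl max best,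
        (List.range (mI mt).toNat).map (fun (j : Nat) => Pv mt dr dc x (j : Int))) := by
  have gen : ∀ (l : List Nat), (∀ j ∈ l, (j : Int) < mI mt) →
      ∀ (b : Int) (acc : List Int), 0 ≤ b →
      l.foldl (fun st (yn : Nat) =>
          let r := cellB mt (nI mt) (mI mt) dr dc x (yn : Int) st.1 prev
          (r.1, st.2 ++ [r.2])) (b, acc)
        = ((l.map (fun (c : Nat) => CC mt (dr, dc) x (c : Int))).foldl max b,
            acc ++ l.map (fun (j : Nat) => Pv mt dr dc x (j : Int))) := by
    intro l
    induction l with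
    | nil => intro _ b acc _; simp
    | cons j l ih =>
      intro hmem b acc hb
      simp only [List.foldl_cons, List.map_cons]
      rw [cellB_eq mt hdr hx0 hx1 (by positivity) (hmem j (by simp)) hb hprev]
      rw [ih (fun j hj => hmem j (by simp [hj])) _ _
        (le_trans hb (le_max_left _ _))]
      simp
  have hml : (mI mt).toNat = (mt.headD []).length := by simp [mI]
  rw [rowB, hml]
  rw [gen (List.range (mt.headD []).length)
    (fun j hj => by unfold mI; exact_mod_cast List.mem_range.mp hj) best [] hb]
  simp [blockB]

def descBy (dr : Int) : List Int → Prop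
  | [] => True
  | [_] => True
  | a :: b :: t => b = a - dr ∧ descBy dr (b :: t)

theorem rev_succ (k : Nat) :
    ((List.range (k + 1)).map Int.ofNat).reverse
      = (k : Int) :: ((List.range k).map Int.ofNat).reverse := by
  simp [List.range_succ]

theorem descBy_rev (n : Nat) : descBy 1 (((List.range n).map Int.ofNat).reverse) := by
  induction n with
  | zero => simp [descBy]
  | succ p ih =>
    rw [rev_succ]
    cases p with
    | zero => simp [descBy]
    | succ q =>
      rw [rev_succ]
      rw [rev_succ] at ih
      exact ⟨by push_cast; ring, ih⟩

theorem descBy_range' : ∀ (k s : Nat), descBy (-1) ((List.range' s k).map Int.ofNat) := by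
  intro k
  induction k with
  | zero => intro s; simp [descBy]
  | succ p ih =>
    intro s
    rw [List.range'_succ]
    cases p with
    | zero => simp [descBy]
    | succ q =>
      have h := ih (s + 1)
      rw [List.range'_succ] at h ⊢
      exact ⟨by simp only [Int.ofNat_eq_natCast]; omega, h⟩

theorem descBy_asc (n : Nat) : descBy (-1) ((List.range n).map Int.ofNat) := by
  rw [List.range_eq_range']
  exact descBy_range' n 0

theorem pyGetD_replicate (k : Nat) {j : Int} (h0 : 0 ≤ j) :
    PySem.List.pyGetD (List.replicate k (0 : Int)) j 0 = 0 := by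
  rw [PySem.List.pyGetD_of_nonneg _ _ h0]
  rcases lt_or_ge j.toNat k with h | h
  · rw [List.getD_eq_getElem _ _ (by simpa using h), List.getElem_replicate]
  · rw [List.getD_eq_default _ _ (by simpa using h)]

theorem rowsB_gen (mt : List (List Int)) {dr : Int} (dc : Int) (hdr : dr = 1 ∨ dr = -1) :
    ∀ (xs : List Int) (b : Int) (prev : List Int), 0 ≤ b →
      (∀ x ∈ xs, 0 ≤ x ∧ x < nI mt) →
      descBy dr xs →
      (∀ x0, xs.head? = some x0 → ∀ j : Int, 0 ≤ j → j < mI mt →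
        PySem.List.pyGetD prev j 0 = Pv mt dr dc (x0 + dr) j) →
      (xs.foldl (fun st x => rowB mt (nI mt) (mI mt) dr dc x st.1 st.2) (b, prev)).1
        = (xs.flatMap (fun x => blockB mt (dr, dc) x)).foldl max b := by
  intro xs
  induction xs with
  | nil => intro b prev _ _ _ _; simp
  | cons x rest ih =>
    intro b prev hb hbounds hdesc hhead
    simp only [List.foldl_cons, List.flatMap_cons]
    rw [rowB_eq mt hdr (hbounds x (by simp)).1 (hbounds x (by simp)).2 hb (hhead x rfl)]
    rw [List.foldl_append]
    apply ih _ _ (le_trans hb (PySem.List.le_foldl_max _ _).1)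
      (fun z hz => hbounds z (by simp [hz]))
    · cases rest with
      | nil => trivial
      | cons x2 t => exact hdesc.2
    · intro x2 hx2 j hj0 hj1
      cases rest with
      | nil => simp at hx2
      | cons x2' t =>
        have hx2e : x2 = x - dr := by
          simp at hx2
          rw [← hx2]
          exact hdesc.1
        have hxx : x2 + dr = x := by omega
        rw [hxx]
        have hjt : j.toNat < (mI mt).toNat := by omega
        rw [PySem.List.pyGetD_of_nonneg _ _ hj0,
          PySem.List.getD_map_range _ _ _ _ hjt]
        rw [show ((j.toNat : Nat) : Int) = j from Int.toNat_of_nonneg hj0]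

theorem dirB_eq (mt : List (List Int)) {d : Int × Int} (hdr : d.1 = 1 ∨ d.1 = -1)
    {best : Int} (hb : 0 ≤ best) :
    dirB mt (nI mt) (mI mt) d best =
      ((rowsL mt d.1).flatMap (fun x => blockB mt d x)).foldl max best := by
  have hn : (nI mt).toNat = mt.length := by simp [nI]
  obtain ⟨d1, d2⟩ := d
  rcases hdr with h1 | h1 <;> simp only at h1 <;> subst h1
  · rw [dirB, if_pos rfl, rowsL, if_pos rfl, hn]
    apply rowsB_gen mt d2 (Or.inl rfl) _ best _ hb
    · intro z hz
      simp only [List.mem_reverse, List.mem_map, List.mem_range] at hz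
      obtain ⟨k, hk, rfl⟩ := hz
      refine ⟨by simp only [Int.ofNat_eq_natCast]; omega, ?_⟩
      unfold nI
      simp only [Int.ofNat_eq_natCast]
      omega
    · exact descBy_rev mt.length
    · intro x0 hx0 j hj0 hj1
      cases hlen : mt.length with
      | zero => rw [hlen] at hx0; simp at hx0
      | succ p =>
        rw [hlen, rev_succ] at hx0
        simp at hx0
        subst hx0
        rw [pyGetD_replicate _ hj0, Pv, if_neg ?_]
        intro hc
        have : ((p : Int) + 1) < nI mt := hc.1.2.1
        unfold nI at this
        omega
  · rw [dirB, if_neg (by norm_num), rowsL, if_neg (by norm_num), hn]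
    apply rowsB_gen mt d2 (Or.inr rfl) _ best _ hb
    · intro z hz
      simp only [List.mem_map, List.mem_range] at hz
      obtain ⟨k, hk, rfl⟩ := hz
      refine ⟨by simp only [Int.ofNat_eq_natCast]; omega, ?_⟩
      unfold nI
      simp only [Int.ofNat_eq_natCast]
      omega
    · exact descBy_asc mt.length
    · intro x0 hx0 j hj0 hj1
      cases hlen : mt.length with
      | zero => rw [hlen] at hx0; simp at hx0
      | succ p =>
        rw [hlen] at hx0
        rw [List.range_eq_range', List.range'_succ] at hx0
        simp at hx0
        subst hx0
        rw [pyGetD_replicate _ hj0, Pv, if_neg ?_]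
        intro hc
        have : (0 : Int) ≤ (0 : Int) + (-1) := hc.1.1
        omega

theorem solution_alt_eq_listB (mt : List (List Int))
    (h : ¬ (mt = [] ∨ mt.headD [] = [])) :
    solution_alt mt = (listB mt).foldl max 0 := by
  unfold solution_alt
  rw [if_neg h]
  rw [listB, List.foldl_flatMap]
  have hall : ∀ d ∈ pvDirs, d.1 = 1 ∨ d.1 = -1 := by decide
  exact foldl_eq_of_inv _ _ _ (fun b => 0 ≤ b)
    (fun b d _ hb => le_trans hb (PySem.List.le_foldl_max _ _).1)
    (fun b d hd hb => dirB_eq mt (hall d hd) hb)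
    0 le_rfl

theorem split_perm (R C : List Nat) (f g : Nat → Nat → List Int) :
    (R.flatMap (fun (r : Nat) => C.flatMap (fun (c : Nat) => f r c ++ g r c))).Perm
      ((R.flatMap (fun r => C.flatMap (fun c => f r c)))
        ++ (R.flatMap (fun r => C.flatMap (fun c => g r c)))) :=
  List.Perm.trans
    (List.Perm.flatMap_left R (fun r _ => (List.flatMap_append_perm C (f r) (g r)).symm))
    (List.flatMap_append_perm R _ _).symm

theorem block_perm (mt : List (List Int)) (d : Int × Int) :
    ((List.range mt.length).flatMap
        (fun (r : Nat) => (List.range (mt.headD []).length).flatMap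
          (fun (c : Nat) => [CC mt d (r : Int) (c : Int)]))).Perm
      ((rowsL mt d.1).flatMap (fun x => blockB mt d x)) := by
  have hsing : ∀ (r : Nat),
      ((List.range (mt.headD []).length).flatMap
        (fun (c : Nat) => [CC mt d (r : Int) (c : Int)])) = blockB mt d (r : Int) := by
    intro r
    rw [blockB]
    exact Eq.symm List.map_eq_flatMap
  have hbase :
      ((List.range mt.length).flatMap
        (fun (r : Nat) => (List.range (mt.headD []).length).flatMap
          (fun (c : Nat) => [CC mt d (r : Int) (c : Int)])))
      = (((List.range mt.length).map Int.ofNat).flatMap (fun x => blockB mt d x)) := by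
    rw [List.flatMap_map]
    exact List.flatMap_congr (fun r _ => hsing r)
  rw [hbase, rowsL]
  split_ifs with h1
  · exact (List.Perm.flatMap_right _ (List.reverse_perm _)).symm
  · exact List.Perm.refl _

theorem perm_listA_listB (mt : List (List Int)) : (listA mt).Perm (listB mt) := by
  have h1 := split_perm (List.range mt.length) (List.range (mt.headD []).length)
    (fun r c => [CC mt (1, 1) (r : Int) (c : Int)])
    (fun r c => [CC mt (1, -1) (r : Int) (c : Int)]
      ++ ([CC mt (-1, 1) (r : Int) (c : Int)] ++ [CC mt (-1, -1) (r : Int) (c : Int)]))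
  have h2 := split_perm (List.range mt.length) (List.range (mt.headD []).length)
    (fun r c => [CC mt (1, -1) (r : Int) (c : Int)])
    (fun r c => [CC mt (-1, 1) (r : Int) (c : Int)] ++ [CC mt (-1, -1) (r : Int) (c : Int)])
  have h3 := split_perm (List.range mt.length) (List.range (mt.headD []).length)
    (fun r c => [CC mt (-1, 1) (r : Int) (c : Int)])
    (fun r c => [CC mt (-1, -1) (r : Int) (c : Int)])
  have hA := h1.trans ((h2.trans (h3.append_left _)).append_left _)
  have hB : listB mt =
      ((rowsL mt (1 : Int)).flatMap (fun x => blockB mt (1, 1) x))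
        ++ (((rowsL mt (1 : Int)).flatMap (fun x => blockB mt (1, -1) x))
          ++ (((rowsL mt (-1 : Int)).flatMap (fun x => blockB mt (-1, 1) x))
            ++ ((rowsL mt (-1 : Int)).flatMap (fun x => blockB mt (-1, -1) x)))) := by
    simp [listB, pvDirs]
  rw [hB]
  exact hA.trans
    (List.Perm.append (block_perm mt (1, 1))
      (List.Perm.append (block_perm mt (1, -1))
        (List.Perm.append (block_perm mt (-1, 1)) (block_perm mt (-1, -1)))))

-- ===== VERDICT (by name: the statement is the Claim_ definition above) =====
theorem solution_spec : Claim_equal_solution := by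
  intro mt _ _
  unfold Spec_solution
  by_cases h : mt = [] ∨ mt.headD [] = []
  · simp only [solution, solution_alt, if_pos h]
  · rw [solution_eq_listA mt h, solution_alt_eq_listB mt h]
    exact (perm_listA_listB mt).foldl_op_eq
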